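-- pv_equiv track=rewrite | github.com/rezekiz/exercicios-algoritmos-bioseqs | auxiliares.py | max_score_loc
-- ===== SOURCE A (Python) =====
-- def max_score_loc(scr):
--     ms = scr[0][0]
--     mi,mj = 0,0
--     for linha in range(len(scr)): # itera por cada linha
--
--         for coluna in range(len(scr[linha])): # itera por cada item de cada linha
--             if scr[linha][coluna] > ms:
--                 ms = scr[linha][coluna] # regista o maior
--                 mi,mj = linha,coluna # regista as coordenadas
--
--     return mi,mj
-- ===== SOURCE B (Python) =====
-- def max_score_loc(scr):
--     best = scr[0][0]
--     summaries = []
--     for i, row in enumerate(scr):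
--         if row:
--             m, c = row[0], 0
--             for j in range(1, len(row)):
--                 if row[j] > m:
--                     m, c = row[j], j
--             summaries.append((i, m, c))
--     bi, bj = 0, 0
--     for i, m, c in summaries:
--         if m > best:
--             best, bi, bj = m, i, c
--     return bi, bj
-- ===== Notes on version B (the rewrite author's own statement) =====
-- stated objective: alternative
-- what changed: Replaces A's single row-major nested scan carrying one global (max, coords) state by a two-phase decomposition: first build per-row summaries (row max and first argmax column), then a second scan over the summaries picks the first row strictly improving on scr[0][0].
import Mathlib
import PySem

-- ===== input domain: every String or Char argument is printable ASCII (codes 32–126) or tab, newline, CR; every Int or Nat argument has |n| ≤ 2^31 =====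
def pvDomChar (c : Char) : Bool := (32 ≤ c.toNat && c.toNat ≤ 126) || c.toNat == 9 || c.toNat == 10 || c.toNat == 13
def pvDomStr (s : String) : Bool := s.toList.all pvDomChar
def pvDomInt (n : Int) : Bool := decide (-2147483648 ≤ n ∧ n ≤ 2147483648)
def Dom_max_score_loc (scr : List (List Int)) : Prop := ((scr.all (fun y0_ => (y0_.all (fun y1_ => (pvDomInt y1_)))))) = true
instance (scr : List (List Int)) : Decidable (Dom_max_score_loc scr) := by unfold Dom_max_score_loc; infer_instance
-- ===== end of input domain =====

-- B replaces A's single row-major nested scan with a two-phase decomposition (per-row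
-- summaries, then a scan over the summaries); same cost, alternative structure.

-- ===== PORT A =====
-- A's 'for linha in range(len(scr))' / 'for coluna in range(len(scr[linha]))' index loops
-- with in-range reads are transcribed as folds over PySem.List.enumerate (exact for in-range
-- indices); scr[0][0] exists under Pre_ (headD defaults are unreachable inside Pre_).
def max_score_loc (scr : List (List Int)) : Int × Int :=
  let ms := (scr.headD []).headD 0
  let st := (PySem.List.enumerate scr).foldl
    (fun st p =>
      (PySem.List.enumerate p.2).foldl
        (fun st q => if q.2 > st.1 then (q.2, (p.1, q.1)) else st) st)
    (ms, ((0 : Int), (0 : Int)))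
  st.2

-- ===== PORT B =====
-- 'm, c = row[0], 0; for j in range(1, len(row)): …'
def pvRowSummary (row : List Int) : Int × Int :=
  ((PySem.List.enumerate row).drop 1).foldl
    (fun mc q => if q.2 > mc.1 then (q.2, q.1) else mc) (row.headD 0, 0)

def max_score_loc_alt (scr : List (List Int)) : Int × Int :=
  let best := (scr.headD []).headD 0
  let summaries := (PySem.List.enumerate scr).foldl
    (fun acc p => if p.2 ≠ [] then acc ++ [(p.1, pvRowSummary p.2)] else acc)
    ([] : List (Int × Int × Int))
  let st := summaries.foldl
    (fun st s => if s.2.1 > st.1 then (s.2.1, (s.1, s.2.2)) else st)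
    (best, ((0 : Int), (0 : Int)))
  st.2

-- ===== PRECONDITION & SPEC =====
-- Pre_ excludes exactly the inputs where A raises IndexError at 'scr[0][0]': empty scr or empty first row.
def Pre_max_score_loc (scr : List (List Int)) : Prop := scr ≠ [] ∧ scr.headD [] ≠ []
instance (scr : List (List Int)) : Decidable (Pre_max_score_loc scr) := by unfold Pre_max_score_loc; infer_instance
def pvWitness_max_score_loc : List (List Int) := [[1, 3], [2]]
def Spec_max_score_loc (scr : List (List Int)) (out : Int × Int) : Prop := out = max_score_loc_alt scr
instance (scr : List (List Int)) (out : Int × Int) : Decidable (Spec_max_score_loc scr out) := by unfold Spec_max_score_loc; infer_instance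

-- ===== CLAIM (what is proved, stated in full; the proofs are below) =====
def Claim_equal_max_score_loc : Prop := ∀ (scr : List (List Int)), Dom_max_score_loc scr → Pre_max_score_loc scr → Spec_max_score_loc scr (max_score_loc scr)

-- ===== LEMMAS AND PROOFS =====

-- A's inner loop over one row, started from a state whose max came from (m0, c0) if it beats ms,
-- equals the per-row summary scan followed by one strict comparison against ms.
lemma pvInner (ps : List (Int × Int)) (linha : Int) (m0 c0 ms mi mj : Int) :
    ps.foldl (fun st q => if q.2 > st.1 then (q.2, (linha, q.1)) else st)
      (if m0 > ms then (m0, (linha, c0)) else (ms, (mi, mj)))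
    = (let mc := ps.foldl (fun mc q => if q.2 > mc.1 then (q.2, q.1) else mc) (m0, c0)
       if mc.1 > ms then (mc.1, (linha, mc.2)) else (ms, (mi, mj))) := by
  induction ps generalizing m0 c0 with
  | nil => simp
  | cons q tl ih =>
    obtain ⟨j, v⟩ := q
    simp only [List.foldl_cons]
    by_cases h0 : m0 > ms
    · by_cases hv : v > m0
      · have hvms : v > ms := lt_trans h0 hv
        simpa [h0, hv, hvms] using ih v j
      · simpa [h0, hv] using ih m0 c0
    · by_cases hv : v > m0
      · simpa [h0, hv] using ih v j
      · have hvms : ¬ v > ms := by omega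
        simpa [h0, hv, hvms] using ih m0 c0

-- Folding B's second phase over the summary list built by B's first phase equals a single
-- combined fold over the enumerated rows.
lemma pvBuildPhase (rs : List (Int × List Int)) (acc : List (Int × Int × Int))
    (s : Int × Int × Int) :
    (rs.foldl (fun acc p => if p.2 ≠ [] then acc ++ [(p.1, pvRowSummary p.2)] else acc) acc).foldl
      (fun st s => if s.2.1 > st.1 then (s.2.1, (s.1, s.2.2)) else st) s
    = rs.foldl
        (fun st p => if p.2 ≠ [] then
            (if (pvRowSummary p.2).1 > st.1 then ((pvRowSummary p.2).1, (p.1, (pvRowSummary p.2).2)) else st)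
          else st)
        (acc.foldl (fun st s => if s.2.1 > st.1 then (s.2.1, (s.1, s.2.2)) else st) s) := by
  induction rs generalizing acc s with
  | nil => simp
  | cons p tl ih =>
    simp only [List.foldl_cons]
    rw [ih]
    by_cases hp : p.2 = []
    · simp [hp]
    · simp [hp, List.foldl_append]

-- Per enumerated row, A's inner loop acts on the running state exactly as the combined step.
lemma pvRowStep (p : Int × List Int) (st : Int × Int × Int) :
    (PySem.List.enumerate p.2).foldl
        (fun st q => if q.2 > st.1 then (q.2, (p.1, q.1)) else st) st
    = (if p.2 ≠ [] then
        (if (pvRowSummary p.2).1 > st.1 then ((pvRowSummary p.2).1, (p.1, (pvRowSummary p.2).2)) else st)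
      else st) := by
  obtain ⟨linha, row⟩ := p
  obtain ⟨ms, mi, mj⟩ := st
  cases row with
  | nil => simp [PySem.List.enumerate]
  | cons v r =>
    have h := pvInner (PySem.List.enumerate r 1) linha v 0 ms mi mj
    simp only [PySem.List.enumerate_cons, List.foldl_cons] at *
    simpa [pvRowSummary, PySem.List.enumerate_cons] using h

theorem max_score_loc_spec_aux (scr : List (List Int)) :
    max_score_loc scr = max_score_loc_alt scr := by
  simp only [max_score_loc, max_score_loc_alt]
  rw [pvBuildPhase]
  simp only [List.foldl_nil]
  congr 1
  exact PySem.List.foldl_congr_mem _ _ _ _ (fun st p _ => pvRowStep p st)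

-- ===== VERDICT (by name: the statement is the Claim_ definition above) =====
theorem max_score_loc_spec : Claim_equal_max_score_loc := by
  intro scr _ _
  exact max_score_loc_spec_aux scr
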